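-- pv_equiv track=rewrite | github.com/kurinczkydd/turtlebot3_controller | turtlebot3_controller/path.py | pad_walls
-- ===== SOURCE A (Python) =====
-- import copy
--
-- def pad_walls(grid, pad_distance):
--     # create a copy of the grid to avoid modifying it while iterating
--     new_grid = copy.deepcopy(grid)
--
--     # iterate over the cells in the grid
--     for i in range(len(grid)):
--         for j in range(len(grid[i])):
--             # if this cell is a wall
--             if grid[i][j] == 2:
--                 # iterate over the neighboring cells within the padding distance
--                 for di in range(-pad_distance, pad_distance + 1):
--                     for dj in range(-pad_distance, pad_distance + 1):
--                         # if the neighboring cell is within the grid and not a wall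
--                         ni, nj = i + di, j + dj
--                         if (0 <= ni < len(grid)) and (0 <= nj < len(grid[i])) and grid[ni][nj] != 2:
--                             # set it to be a wall
--                             new_grid[ni][nj] = 2
--     return new_grid
-- ===== SOURCE B (Python) =====
-- def _dilate_row(flags, p, n):
--     # prefix counts of set flags, then an O(1) window query per column
--     pre = [0]
--     for f in flags:
--         pre.append(pre[-1] + (1 if f else 0))
--     return [pre[min(c + p + 1, n)] - pre[max(c - p, 0)] > 0 for c in range(n)]
--
--
-- def pad_walls(grid, pad_distance):
--     p = pad_distance
--     if p < 0:
--         return [list(row) for row in grid]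
--     R = len(grid)
--     # horizontal pass: h[i][c] == True iff row i has a wall within p columns of c
--     h = [_dilate_row([v == 2 for v in row], p, len(row)) for row in grid]
--     # vertical pass: a cell becomes a wall iff some nearby row reaches it
--     return [[2 if any(h[i][c] for i in range(max(r - p, 0), min(r + p + 1, R))
--                       if c < len(h[i]))
--              else v
--              for c, v in enumerate(row)]
--             for r, row in enumerate(grid)]
-- ===== Notes on version B (the rewrite author's own statement) =====
-- stated objective: faster
-- what changed: Replaces A's per-wall O(p^2) neighbourhood stamping with a separable dilation: a prefix-sum horizontal pass giving O(1) window queries per column, then a vertical window pass per cell.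
import Mathlib
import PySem

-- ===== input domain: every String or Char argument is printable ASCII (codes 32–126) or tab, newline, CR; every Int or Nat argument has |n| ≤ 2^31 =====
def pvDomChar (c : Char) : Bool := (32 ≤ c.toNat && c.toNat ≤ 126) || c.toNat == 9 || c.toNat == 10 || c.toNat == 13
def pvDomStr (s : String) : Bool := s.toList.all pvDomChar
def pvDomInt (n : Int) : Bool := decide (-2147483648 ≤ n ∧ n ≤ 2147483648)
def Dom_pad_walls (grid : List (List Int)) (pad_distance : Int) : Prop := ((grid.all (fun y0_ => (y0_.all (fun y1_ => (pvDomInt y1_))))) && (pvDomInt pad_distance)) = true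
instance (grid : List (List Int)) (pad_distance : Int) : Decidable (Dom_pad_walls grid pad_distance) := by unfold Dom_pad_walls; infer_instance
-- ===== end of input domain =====

-- B replaces A's per-wall quadratic stamping by a separable dilation: one prefix-sum
-- horizontal pass per row, then a vertical window pass per cell.

-- ===== PORT A =====
-- len(grid[i]); i is always in range where this is used
def pvRowLenA (grid : List (List Int)) (i : Int) : Int :=
  ((PySem.List.pyGetD grid i []).length : Int)

-- grid[i][j] as a total read; exact whenever the indices are in range (guaranteed
-- by A's guards together with Pre_pad_walls)
def pvCellA (grid : List (List Int)) (i j : Int) : Int :=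
  PySem.List.pyGetD (PySem.List.pyGetD grid i []) j 0

def pad_walls (grid : List (List Int)) (pad_distance : Int) : List (List Int) :=
  (PySem.List.pyRange 0 grid.length 1).foldl (fun ng i =>
    (PySem.List.pyRange 0 (pvRowLenA grid i) 1).foldl (fun ng j =>
      if pvCellA grid i j = 2 then
        (PySem.List.pyRange (-pad_distance) (pad_distance + 1) 1).foldl (fun ng di =>
          (PySem.List.pyRange (-pad_distance) (pad_distance + 1) 1).foldl (fun ng dj =>
            let ni := i + di
            let nj := j + dj
            if 0 ≤ ni ∧ ni < (grid.length : Int) ∧ 0 ≤ nj ∧ nj < pvRowLenA grid i ∧ pvCellA grid ni nj ≠ 2 then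
              ng.modify ni.toNat (fun row => row.modify nj.toNat (fun _ => 2))
            else ng) ng) ng
      else ng) ng) grid

-- ===== PORT B =====
-- _dilate_row: prefix counts, then one O(1) window query per column
def pvDilateRow (flags : List Bool) (p : Int) (n : Int) : List Bool :=
  let pre := flags.foldl (fun acc f => acc ++ [acc.getLastD 0 + (if f then (1 : Int) else 0)]) [0]
  (PySem.List.pyRange 0 n 1).map (fun c =>
    decide (0 < PySem.List.pyGetD pre (min (c + p + 1) n) 0 - PySem.List.pyGetD pre (max (c - p) 0) 0))

def pad_walls_alt (grid : List (List Int)) (pad_distance : Int) : List (List Int) :=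
  let p := pad_distance
  if p < 0 then
    grid.map (fun row => row)
  else
    let R : Int := grid.length
    let h := grid.map (fun row => pvDilateRow (row.map (fun v => v == 2)) p (row.length : Int))
    (PySem.List.enumerate grid).map (fun rrow =>
      (PySem.List.enumerate rrow.2).map (fun cv =>
        if (PySem.List.pyRange (max (rrow.1 - p) 0) (min (rrow.1 + p + 1) R) 1).any (fun i =>
              decide (cv.1 < ((PySem.List.pyGetD h i []).length : Int)) &&
              PySem.List.pyGetD (PySem.List.pyGetD h i []) cv.1 false)
        then 2 else cv.2))

-- ===== PRECONDITION & SPEC =====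
-- wall (i,j) can reach the missing cell (ni,nj): window distances fit but the
-- target row is too short
def pvBadPair (grid : List (List Int)) (p : Int) (i j ni nj : Nat) : Bool :=
  decide (|(ni : Int) - i| ≤ p) && decide (|(nj : Int) - j| ≤ p) &&
    decide ((grid.getD ni []).length ≤ nj)

-- Pre_ excludes exactly the (ragged) grids on which A raises: some wall's padding
-- window, bounded by the wall's own row length, reaches a column missing from the
-- target row, so `grid[ni][nj]` raises IndexError.
def Pre_pad_walls (grid : List (List Int)) (pad_distance : Int) : Prop :=
  ((List.range grid.length).any (fun i =>
    (List.range (grid.getD i []).length).any (fun j =>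
      ((grid.getD i []).getD j 0 == 2) &&
      (List.range grid.length).any (fun ni =>
        (List.range (grid.getD i []).length).any (fun nj =>
          pvBadPair grid pad_distance i j ni nj))))) = false

instance (grid : List (List Int)) (pad_distance : Int) : Decidable (Pre_pad_walls grid pad_distance) := by
  unfold Pre_pad_walls; infer_instance

def pvWitness_pad_walls : List (List Int) × Int := ([[2, 0], [0, 0]], 1)

def Spec_pad_walls (grid : List (List Int)) (pad_distance : Int) (out : List (List Int)) : Prop := out = pad_walls_alt grid pad_distance
instance (grid : List (List Int)) (pad_distance : Int) (out : List (List Int)) : Decidable (Spec_pad_walls grid pad_distance out) := by unfold Spec_pad_walls; infer_instance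

-- ===== CLAIM (what is proved, stated in full; the proofs are below) =====
def Claim_equal_pad_walls : Prop := ∀ (grid : List (List Int)) (pad_distance : Int), Dom_pad_walls grid pad_distance → Pre_pad_walls grid pad_distance → Spec_pad_walls grid pad_distance (pad_walls grid pad_distance)


-- ===== LEMMAS AND PROOFS =====

-- two-level lookup new_grid[r][c]
def pvGet2 (g : List (List Int)) (r c : Nat) : Option Int :=
  g[r]?.bind (fun row => row[c]?)

def pvMapLen (g : List (List Int)) : List Nat := g.map List.length

lemma pvMapLen_length {g g' : List (List Int)} (h : pvMapLen g = pvMapLen g') :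
    g.length = g'.length := by
  simpa [pvMapLen] using congrArg List.length h

lemma pvMapLen_row {g g' : List (List Int)} (h : pvMapLen g = pvMapLen g') (r : Nat) :
    (g.getD r []).length = (g'.getD r []).length := by
  have h1 : ∀ g0 : List (List Int), (pvMapLen g0).getD r 0 = (g0.getD r []).length := by
    intro g0
    simp [pvMapLen, List.getD_eq_getElem?_getD, List.getElem?_map]
    cases g0[r]? <;> simp
  rw [← h1, ← h1, h]

lemma pvGet2_modify (g : List (List Int)) (r c : Nat) (ni nj : Int)
    (h1 : 0 ≤ ni) (h2 : 0 ≤ nj) :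
    pvGet2 (g.modify ni.toNat (fun row => row.modify nj.toNat (fun _ => 2))) r c
      = if ni = (r : Int) ∧ nj = (c : Int) ∧ r < g.length ∧ c < (g.getD r []).length
        then some 2 else pvGet2 g r c := by
  unfold pvGet2
  rw [List.getElem?_modify]
  by_cases hr : ni.toNat = r
  · cases hg : g[r]? with
    | none =>
      have : ¬ r < g.length := by
        intro hlt; exact absurd (List.getElem?_eq_getElem hlt ▸ hg) (by simp)
      simp [hr, this]
    | some row =>
      have hrow : g.getD r [] = row := by simp [List.getD_eq_getElem?_getD, hg]
      have hlt : r < g.length := by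
        by_contra hx
        rw [List.getElem?_eq_none_iff.2 (by omega)] at hg; exact absurd hg (by simp)
      rw [hr]
      simp only [Option.bind_some]
      have hgr : g[r]'hlt = row := by
        have h3 := List.getElem?_eq_getElem hlt
        rw [hg] at h3
        exact (Option.some_inj.mp h3).symm
      by_cases hcq : nj.toNat = c
      · have hni : ni = (r : Int) := by omega
        have hnj : nj = (c : Int) := by omega
        by_cases hcl : c < row.length
        · rw [hcq, List.getElem?_eq_getElem hcl]
          simp [hni, hnj, hlt, hgr, hcl]
        · rw [hcq, List.getElem?_eq_none_iff.2 (by omega)]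
          have hC : ¬ (ni = (r : Int) ∧ nj = (c : Int) ∧ r < g.length ∧ c < (g.getD r []).length) := by
            rintro ⟨-, -, -, h4⟩
            rw [hrow] at h4
            exact hcl h4
          rw [if_neg hC]
          simp [List.getElem?_eq_none_iff.2 (show row.length ≤ c by omega)]
      · have hne : ¬ (nj = (c : Int)) := by omega
        simp [hcq, hne, hg]
  · have hne : ¬ (ni = (r : Int)) := by omega
    simp [hr, hne]

lemma pvMapLen_modify (g : List (List Int)) (i j : Nat) :
    pvMapLen (g.modify i (fun row => row.modify j (fun _ => 2))) = pvMapLen g := by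
  unfold pvMapLen
  apply List.ext_getElem?
  intro k
  simp [List.getElem?_map, List.getElem?_modify]
  cases hk : g[k]? with
  | none => simp
  | some row => by_cases hik : i = k <;> simp [hik]

lemma pv_foldl_stamp {α : Type} (T : α → Bool)
    (step : List (List Int) → α → List (List Int)) (sh : List Nat) (r c : Nat)
    (hpres : ∀ g a, pvMapLen g = sh → pvMapLen (step g a) = sh)
    (hstep : ∀ g a, pvMapLen g = sh →
      pvGet2 (step g a) r c = if T a then some 2 else pvGet2 g r c) :
    ∀ (L : List α) (g : List (List Int)), pvMapLen g = sh →
      pvMapLen (L.foldl step g) = sh ∧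
      pvGet2 (L.foldl step g) r c
        = if L.any T then some 2 else pvGet2 g r c := by
  intro L
  induction L with
  | nil => intro g hg; simpa using hg
  | cons a L ih =>
    intro g hg
    have hg' : pvMapLen (step g a) = sh := hpres g a hg
    obtain ⟨ih1, ih2⟩ := ih (step g a) hg'
    refine ⟨by simpa using ih1, ?_⟩
    rw [List.foldl_cons, ih2, hstep g a hg, List.any_cons]
    by_cases hTa : T a = true <;> by_cases hL : L.any T = true <;> simp [hTa, hL]


-- the condition under which A stamps cell (r,c): some wall can reach it
def pvCondA (grid : List (List Int)) (p : Int) (r c : Nat) : Bool :=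
  (PySem.List.pyRange 0 grid.length 1).any fun i =>
    (PySem.List.pyRange 0 (pvRowLenA grid i) 1).any fun j =>
      (pvCellA grid i j == 2) &&
      ((PySem.List.pyRange (-p) (p + 1) 1).any fun di =>
        (PySem.List.pyRange (-p) (p + 1) 1).any fun dj =>
          (decide (0 ≤ i + di) && decide (i + di < (grid.length : Int)) && decide (0 ≤ j + dj) && decide (j + dj < pvRowLenA grid i) && !(pvCellA grid (i + di) (j + dj) == 2)) &&
          (i + di == (r : Int)) && (j + dj == (c : Int)) && decide (r < grid.length) && decide (c < (grid.getD r []).length))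

lemma padA_char (grid : List (List Int)) (p : Int) (r c : Nat) :
    pvMapLen (pad_walls grid p) = pvMapLen grid ∧
    pvGet2 (pad_walls grid p) r c
      = if pvCondA grid p r c then some 2 else pvGet2 grid r c := by
  -- innermost (dj) loop
  have h4 : ∀ (i j di : Int) (g : List (List Int)), pvMapLen g = pvMapLen grid →
      pvMapLen ((PySem.List.pyRange (-p) (p + 1) 1).foldl (fun ng dj =>
        if 0 ≤ i + di ∧ i + di < (grid.length : Int) ∧ 0 ≤ j + dj ∧ j + dj < pvRowLenA grid i ∧ pvCellA grid (i + di) (j + dj) ≠ 2 then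
          ng.modify (i + di).toNat (fun row => row.modify (j + dj).toNat (fun _ => 2))
        else ng) g) = pvMapLen grid ∧
      pvGet2 ((PySem.List.pyRange (-p) (p + 1) 1).foldl (fun ng dj =>
        if 0 ≤ i + di ∧ i + di < (grid.length : Int) ∧ 0 ≤ j + dj ∧ j + dj < pvRowLenA grid i ∧ pvCellA grid (i + di) (j + dj) ≠ 2 then
          ng.modify (i + di).toNat (fun row => row.modify (j + dj).toNat (fun _ => 2))
        else ng) g) r c
        = if (PySem.List.pyRange (-p) (p + 1) 1).any (fun dj =>
            (decide (0 ≤ i + di) && decide (i + di < (grid.length : Int)) && decide (0 ≤ j + dj) && decide (j + dj < pvRowLenA grid i) && !(pvCellA grid (i + di) (j + dj) == 2)) &&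
            (i + di == (r : Int)) && (j + dj == (c : Int)) && decide (r < grid.length) && decide (c < (grid.getD r []).length))
          then some 2 else pvGet2 g r c := by
    intro i j di
    refine pv_foldl_stamp _ _ (pvMapLen grid) r c ?_ ?_ _
    · intro g dj hg
      by_cases hcond : 0 ≤ i + di ∧ i + di < (grid.length : Int) ∧ 0 ≤ j + dj ∧ j + dj < pvRowLenA grid i ∧ pvCellA grid (i + di) (j + dj) ≠ 2
      · rw [if_pos hcond, ← hg]; exact pvMapLen_modify g _ _
      · rw [if_neg hcond]; exact hg
    · intro g dj hg
      have hlen := pvMapLen_length hg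
      have hrow := pvMapLen_row hg r
      by_cases hcond : 0 ≤ i + di ∧ i + di < (grid.length : Int) ∧ 0 ≤ j + dj ∧ j + dj < pvRowLenA grid i ∧ pvCellA grid (i + di) (j + dj) ≠ 2
      · rw [if_pos hcond, pvGet2_modify g r c (i + di) (j + dj) (by exact hcond.1) (by exact hcond.2.2.1)]
        have hiff : (i + di = (r : Int) ∧ j + dj = (c : Int) ∧ r < g.length ∧ c < (g.getD r []).length)
            ↔ ((decide (0 ≤ i + di) && decide (i + di < (grid.length : Int)) && decide (0 ≤ j + dj) && decide (j + dj < pvRowLenA grid i) && !(pvCellA grid (i + di) (j + dj) == 2)) &&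
               (i + di == (r : Int)) && (j + dj == (c : Int)) && decide (r < grid.length) && decide (c < (grid.getD r []).length)) = true := by
          obtain ⟨c1, c2, c3, c4, c5⟩ := hcond
          simp only [Bool.and_eq_true, decide_eq_true_iff, beq_iff_eq, Bool.not_eq_true',
            beq_eq_false_iff_ne, ne_eq, hlen, hrow]
          tauto
        rw [if_congr hiff rfl rfl]
      · rw [if_neg hcond]
        have hF : ((decide (0 ≤ i + di) && decide (i + di < (grid.length : Int)) && decide (0 ≤ j + dj) && decide (j + dj < pvRowLenA grid i) && !(pvCellA grid (i + di) (j + dj) == 2)) &&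
               (i + di == (r : Int)) && (j + dj == (c : Int)) && decide (r < grid.length) && decide (c < (grid.getD r []).length)) = false := by
          rw [Bool.eq_false_iff]
          intro hT
          apply hcond
          simp only [Bool.and_eq_true, decide_eq_true_iff, beq_iff_eq, Bool.not_eq_true',
            beq_eq_false_iff_ne, ne_eq] at hT
          tauto
        rw [hF]
        simp
  -- di loop
  have h3 : ∀ (i j : Int) (g : List (List Int)), pvMapLen g = pvMapLen grid →
      pvMapLen ((PySem.List.pyRange (-p) (p + 1) 1).foldl (fun ng di =>
        (PySem.List.pyRange (-p) (p + 1) 1).foldl (fun ng dj =>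
          if 0 ≤ i + di ∧ i + di < (grid.length : Int) ∧ 0 ≤ j + dj ∧ j + dj < pvRowLenA grid i ∧ pvCellA grid (i + di) (j + dj) ≠ 2 then
            ng.modify (i + di).toNat (fun row => row.modify (j + dj).toNat (fun _ => 2))
          else ng) ng) g) = pvMapLen grid ∧
      pvGet2 ((PySem.List.pyRange (-p) (p + 1) 1).foldl (fun ng di =>
        (PySem.List.pyRange (-p) (p + 1) 1).foldl (fun ng dj =>
          if 0 ≤ i + di ∧ i + di < (grid.length : Int) ∧ 0 ≤ j + dj ∧ j + dj < pvRowLenA grid i ∧ pvCellA grid (i + di) (j + dj) ≠ 2 then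
            ng.modify (i + di).toNat (fun row => row.modify (j + dj).toNat (fun _ => 2))
          else ng) ng) g) r c
        = if (PySem.List.pyRange (-p) (p + 1) 1).any (fun di =>
            (PySem.List.pyRange (-p) (p + 1) 1).any (fun dj =>
              (decide (0 ≤ i + di) && decide (i + di < (grid.length : Int)) && decide (0 ≤ j + dj) && decide (j + dj < pvRowLenA grid i) && !(pvCellA grid (i + di) (j + dj) == 2)) &&
              (i + di == (r : Int)) && (j + dj == (c : Int)) && decide (r < grid.length) && decide (c < (grid.getD r []).length)))
          then some 2 else pvGet2 g r c := by
    intro i j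
    refine pv_foldl_stamp _ _ (pvMapLen grid) r c ?_ ?_ _
    · intro g di hg; exact (h4 i j di g hg).1
    · intro g di hg; exact (h4 i j di g hg).2
  -- j loop
  have h2 : ∀ (i : Int) (g : List (List Int)), pvMapLen g = pvMapLen grid →
      pvMapLen ((PySem.List.pyRange 0 (pvRowLenA grid i) 1).foldl (fun ng j =>
        if pvCellA grid i j = 2 then
          (PySem.List.pyRange (-p) (p + 1) 1).foldl (fun ng di =>
            (PySem.List.pyRange (-p) (p + 1) 1).foldl (fun ng dj =>
              if 0 ≤ i + di ∧ i + di < (grid.length : Int) ∧ 0 ≤ j + dj ∧ j + dj < pvRowLenA grid i ∧ pvCellA grid (i + di) (j + dj) ≠ 2 then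
                ng.modify (i + di).toNat (fun row => row.modify (j + dj).toNat (fun _ => 2))
              else ng) ng) ng
        else ng) g) = pvMapLen grid ∧
      pvGet2 ((PySem.List.pyRange 0 (pvRowLenA grid i) 1).foldl (fun ng j =>
        if pvCellA grid i j = 2 then
          (PySem.List.pyRange (-p) (p + 1) 1).foldl (fun ng di =>
            (PySem.List.pyRange (-p) (p + 1) 1).foldl (fun ng dj =>
              if 0 ≤ i + di ∧ i + di < (grid.length : Int) ∧ 0 ≤ j + dj ∧ j + dj < pvRowLenA grid i ∧ pvCellA grid (i + di) (j + dj) ≠ 2 then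
                ng.modify (i + di).toNat (fun row => row.modify (j + dj).toNat (fun _ => 2))
              else ng) ng) ng
        else ng) g) r c
        = if (PySem.List.pyRange 0 (pvRowLenA grid i) 1).any (fun j =>
            (pvCellA grid i j == 2) &&
            ((PySem.List.pyRange (-p) (p + 1) 1).any fun di =>
              (PySem.List.pyRange (-p) (p + 1) 1).any fun dj =>
                (decide (0 ≤ i + di) && decide (i + di < (grid.length : Int)) && decide (0 ≤ j + dj) && decide (j + dj < pvRowLenA grid i) && !(pvCellA grid (i + di) (j + dj) == 2)) &&
                (i + di == (r : Int)) && (j + dj == (c : Int)) && decide (r < grid.length) && decide (c < (grid.getD r []).length)))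
          then some 2 else pvGet2 g r c := by
    intro i
    refine pv_foldl_stamp _ _ (pvMapLen grid) r c ?_ ?_ _
    · intro g j hg
      by_cases hw : pvCellA grid i j = 2
      · rw [if_pos hw]; exact (h3 i j g hg).1
      · rw [if_neg hw]; exact hg
    · intro g j hg
      by_cases hw : pvCellA grid i j = 2
      · rw [if_pos hw, (h3 i j g hg).2]
        have hwb : (pvCellA grid i j == 2) = true := by simpa using hw
        rw [hwb, Bool.true_and]
      · rw [if_neg hw]
        have hwb : (pvCellA grid i j == 2) = false := by simpa using hw
        rw [hwb, Bool.false_and]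
        simp
  -- i loop
  have h1 := pv_foldl_stamp
    (fun i => (PySem.List.pyRange 0 (pvRowLenA grid i) 1).any (fun j =>
      (pvCellA grid i j == 2) &&
      ((PySem.List.pyRange (-p) (p + 1) 1).any fun di =>
        (PySem.List.pyRange (-p) (p + 1) 1).any fun dj =>
          (decide (0 ≤ i + di) && decide (i + di < (grid.length : Int)) && decide (0 ≤ j + dj) && decide (j + dj < pvRowLenA grid i) && !(pvCellA grid (i + di) (j + dj) == 2)) &&
          (i + di == (r : Int)) && (j + dj == (c : Int)) && decide (r < grid.length) && decide (c < (grid.getD r []).length))))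
    (fun ng i =>
      (PySem.List.pyRange 0 (pvRowLenA grid i) 1).foldl (fun ng j =>
        if pvCellA grid i j = 2 then
          (PySem.List.pyRange (-p) (p + 1) 1).foldl (fun ng di =>
            (PySem.List.pyRange (-p) (p + 1) 1).foldl (fun ng dj =>
              if 0 ≤ i + di ∧ i + di < (grid.length : Int) ∧ 0 ≤ j + dj ∧ j + dj < pvRowLenA grid i ∧ pvCellA grid (i + di) (j + dj) ≠ 2 then
                ng.modify (i + di).toNat (fun row => row.modify (j + dj).toNat (fun _ => 2))
              else ng) ng) ng
        else ng) ng)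
    (pvMapLen grid) r c
    (fun g i hg => (h2 i g hg).1)
    (fun g i hg => (h2 i g hg).2)
    (PySem.List.pyRange 0 grid.length 1) grid rfl
  exact h1

-- prefix list built by B's loop = list of prefix counts
lemma pvPre_char (flags : List Bool) :
    flags.foldl (fun acc f => acc ++ [acc.getLastD 0 + (if f then (1 : Int) else 0)]) [0]
      = (List.range (flags.length + 1)).map (fun k => (((flags.take k).countP id : Nat) : Int)) := by
  induction flags using List.reverseRecOn with
  | nil => simp
  | append_singleton ys y ih =>
    rw [List.foldl_append, ih, List.foldl_cons, List.foldl_nil]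
    have hlast : (((List.range (ys.length + 1)).map (fun k => (((ys.take k).countP id : Nat) : Int))).getLastD 0)
        = ((ys.countP id : Nat) : Int) := by
      rw [List.range_succ, List.map_append]
      simp
    rw [hlast]
    conv_rhs => rw [List.length_append, List.length_singleton, List.range_succ, List.map_append]
    congr 1
    · apply List.map_congr_left
      intro k hk
      rw [List.mem_range] at hk
      rw [List.take_append_of_le_length (by omega)]
    · simp only [List.map_cons, List.map_nil]
      rw [List.take_of_length_le (by simp), List.countP_append]
      cases y <;> simp [id]

lemma pvCount_window (flags : List Bool) (lo hi : Nat) (hle : lo ≤ hi) (hhi : hi ≤ flags.length) :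
    (0 < (((flags.take hi).countP id : Nat) : Int) - (((flags.take lo).countP id : Nat) : Int))
      ↔ ∃ j : Nat, lo ≤ j ∧ j < hi ∧ flags.getD j false = true := by
  have hsplit : flags.take hi = flags.take lo ++ (flags.drop lo).take (hi - lo) := by
    rw [← List.take_add]
    congr 1
    omega
  rw [hsplit, List.countP_append]
  have hlen : ((flags.drop lo).take (hi - lo)).length = hi - lo := by
    simp
    omega
  constructor
  · intro hpos
    have : 0 < ((flags.drop lo).take (hi - lo)).countP id := by omega
    rw [List.countP_pos_iff] at this
    obtain ⟨a, ha, hid⟩ := this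
    rw [List.mem_iff_getElem] at ha
    obtain ⟨k, hk, hak⟩ := ha
    refine ⟨lo + k, by omega, by omega, ?_⟩
    have : ((flags.drop lo).take (hi - lo))[k] = flags[lo + k]'(by omega) := by
      rw [List.getElem_take, List.getElem_drop]
    rw [List.getD_eq_getElem _ _ (by omega), ← this, hak]
    simpa [id] using hid
  · rintro ⟨j, hj1, hj2, hj3⟩
    have hjlen : j < flags.length := by omega
    rw [List.getD_eq_getElem _ _ hjlen] at hj3
    have hmem : flags[j] ∈ (flags.drop lo).take (hi - lo) := by
      rw [List.mem_iff_getElem]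
      refine ⟨j - lo, by omega, ?_⟩
      rw [List.getElem_take, List.getElem_drop]
      congr 1
      omega
    have : 0 < ((flags.drop lo).take (hi - lo)).countP id :=
      List.countP_pos_iff.2 ⟨flags[j], hmem, by simpa [id] using hj3⟩
    omega

lemma pvDilateRow_length (flags : List Bool) (p : Int) :
    (pvDilateRow flags p (flags.length : Int)).length = flags.length := by
  simp [pvDilateRow]

lemma pvDilateRow_get (flags : List Bool) (p : Int) (c : Int)
    (hp : 0 ≤ p) (hc0 : 0 ≤ c) (hcn : c < (flags.length : Int)) :
    (PySem.List.pyGetD (pvDilateRow flags p (flags.length : Int)) c false = true)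
      ↔ ∃ j : Nat, j < flags.length ∧ flags.getD j false = true ∧ |c - (j : Int)| ≤ p := by
  unfold pvDilateRow
  rw [PySem.List.pyGetD_map_pyRange_of_nonneg _ _ _ _ hc0 hcn]
  rw [pvPre_char flags]
  have hpre : ∀ k : Int, 0 ≤ k → k ≤ (flags.length : Int) →
      PySem.List.pyGetD ((List.range (flags.length + 1)).map (fun k => (((flags.take k).countP id : Nat) : Int))) k 0
        = (((flags.take k.toNat).countP id : Nat) : Int) := by
    intro k h0 h1
    rw [PySem.List.pyGetD_eq_getElem _ _ h0 (by simp; omega)]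
    simp
  rw [hpre _ (by omega) (by omega), hpre _ (by omega) (by omega)]
  simp only [decide_eq_true_eq]
  have a1 : c - p ≤ max (c - p) 0 := le_max_left _ _
  have a2 : (0 : Int) ≤ max (c - p) 0 := le_max_right _ _
  have a3 : max (c - p) 0 = c - p ∨ max (c - p) 0 = 0 := max_choice _ _
  have b1 : min (c + p + 1) (flags.length : Int) ≤ c + p + 1 := min_le_left _ _
  have b2 : min (c + p + 1) (flags.length : Int) ≤ (flags.length : Int) := min_le_right _ _
  have b3 : min (c + p + 1) (flags.length : Int) = c + p + 1 ∨ min (c + p + 1) (flags.length : Int) = (flags.length : Int) := min_choice _ _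
  rcases a3 with a3 | a3 <;> rcases b3 with b3 | b3
  all_goals (
    rw [show (0 : Int) < (((flags.take (min (c + p + 1) (flags.length : Int)).toNat).countP id : Nat) : Int) - (((flags.take (max (c - p) 0).toNat).countP id : Nat) : Int)
        ↔ ∃ j : Nat, (max (c - p) 0).toNat ≤ j ∧ j < (min (c + p + 1) (flags.length : Int)).toNat ∧ flags.getD j false = true
      from pvCount_window flags (max (c - p) 0).toNat (min (c + p + 1) (flags.length : Int)).toNat (by omega) (by omega)]
    constructor
    · rintro ⟨j, hj1, hj2, hj3⟩
      exact ⟨j, by omega, hj3, by rw [abs_le]; omega⟩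
    · rintro ⟨j, hj1, hj2, hj3⟩
      have habs := abs_le.mp hj3
      exact ⟨j, by omega, by omega, hj2⟩)

-- the condition under which B turns cell (r,c) into a wall
def pvCondB (grid : List (List Int)) (p : Int) (r c : Nat) : Bool :=
  decide (0 ≤ p) &&
  ((List.range grid.length).any fun i =>
    decide (|(r : Int) - i| ≤ p) && decide (c < (grid.getD i []).length) &&
    ((List.range (grid.getD i []).length).any fun j =>
      ((grid.getD i []).getD j 0 == 2) && decide (|(c : Int) - j| ≤ p)))

lemma pvH_get (grid : List (List Int)) (p : Int) (i : Int)
    (h0 : 0 ≤ i) (h1 : i < (grid.length : Int)) :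
    PySem.List.pyGetD (grid.map (fun row => pvDilateRow (row.map (fun v => v == 2)) p (row.length : Int))) i []
      = pvDilateRow ((grid.getD i.toNat []).map (fun v => v == 2)) p ((grid.getD i.toNat []).length : Int) := by
  rw [PySem.List.pyGetD_eq_getElem _ _ h0 (by simpa using h1)]
  rw [List.getElem_map]
  rw [List.getD_eq_getElem _ _ (by omega)]

lemma pvJ_iff (row : List Int) (p c : Int) (hp : 0 ≤ p) (hc0 : 0 ≤ c) (hcl : c < (row.length : Int)) :
    (PySem.List.pyGetD (pvDilateRow (row.map (fun v => v == 2)) p ((row.length : Int))) c false = true)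
      ↔ ((List.range row.length).any fun j => (row.getD j 0 == 2) && decide (|(c : Int) - j| ≤ p)) = true := by
  have hlen : ((row.map (fun v => v == 2)).length : Int) = (row.length : Int) := by simp
  have hiff := pvDilateRow_get (row.map (fun v => v == 2)) p c hp hc0 (by simpa using hcl)
  rw [hlen] at hiff
  rw [hiff, List.any_eq_true]
  constructor
  · rintro ⟨j, hj1, hj2, hj3⟩
    have hj1' : j < row.length := by simpa using hj1
    refine ⟨j, List.mem_range.2 hj1', ?_⟩
    rw [List.getD_eq_getElem _ _ (show j < (List.map (fun v => v == 2) row).length by simpa using hj1'), List.getElem_map] at hj2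
    rw [List.getD_eq_getElem _ _ hj1']
    simp only [Bool.and_eq_true, decide_eq_true_eq]
    exact ⟨hj2, hj3⟩
  · rintro ⟨j, hjm, hj2⟩
    have hj1' : j < row.length := List.mem_range.1 hjm
    simp only [Bool.and_eq_true, decide_eq_true_eq] at hj2
    refine ⟨j, by simpa using hj1', ?_, hj2.2⟩
    rw [List.getD_eq_getElem _ _ (show j < (List.map (fun v => v == 2) row).length by simpa using hj1'), List.getElem_map]
    rw [List.getD_eq_getElem _ _ hj1'] at hj2
    exact hj2.1

lemma pvDilateRow_length' (row : List Int) (p : Int) :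
    (pvDilateRow (row.map (fun v => v == 2)) p (row.length : Int)).length = row.length := by
  simpa using pvDilateRow_length (row.map (fun v => v == 2)) p

lemma padB_shape (grid : List (List Int)) (p : Int) :
    pvMapLen (pad_walls_alt grid p) = pvMapLen grid := by
  unfold pad_walls_alt pvMapLen
  by_cases hp : p < 0
  · simp [hp]
  · rw [if_neg hp]
    apply List.ext_getElem?
    intro r
    simp only [List.getElem?_map, PySem.List.getElem?_enumerate]
    cases grid[r]? <;> simp [PySem.List.length_enumerate]

lemma padB_char (grid : List (List Int)) (p : Int) (r c : Nat)
    (hr : r < grid.length) (hc : c < (grid.getD r []).length) :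
    pvGet2 (pad_walls_alt grid p) r c
      = if pvCondB grid p r c then some 2 else pvGet2 grid r c := by
  have hgr : grid.getD r [] = grid[r]'hr := List.getD_eq_getElem _ _ hr
  have hc' : c < (grid[r]'hr).length := by rw [← hgr]; exact hc
  unfold pad_walls_alt
  by_cases hp : p < 0
  · rw [if_pos hp]
    have hB : pvCondB grid p r c = false := by
      unfold pvCondB
      have hd : decide (0 ≤ p) = false := by simp; omega
      rw [hd, Bool.false_and]
    rw [hB]
    simp [pvGet2]
  · rw [if_neg hp]
    unfold pvGet2
    rw [List.getElem?_map, PySem.List.getElem?_enumerate, List.getElem?_eq_getElem hr]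
    simp only [Option.map_some, Option.bind_some]
    rw [List.getElem?_map, PySem.List.getElem?_enumerate, List.getElem?_eq_getElem hc']
    simp only [Option.map_some]
    have hANY : ((PySem.List.pyRange (max ((0 : Int) + (r : Int) - p) 0) (min ((0 : Int) + (r : Int) + p + 1) (grid.length : Int)) 1).any (fun i =>
          decide ((0 : Int) + (c : Int) < ((PySem.List.pyGetD (grid.map (fun row => pvDilateRow (row.map (fun v => v == 2)) p (row.length : Int))) i []).length : Int)) &&
          PySem.List.pyGetD (PySem.List.pyGetD (grid.map (fun row => pvDilateRow (row.map (fun v => v == 2)) p (row.length : Int))) i []) ((0 : Int) + (c : Int)) false))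
        = pvCondB grid p r c := by
      rw [Bool.eq_iff_iff]
      simp only [List.any_eq_true, PySem.List.mem_pyRange_one, zero_add]
      constructor
      · rintro ⟨i, ⟨hi1, hi2⟩, hbody⟩
        have hm1 : max ((r : Int) - p) 0 ≤ i := by simpa using hi1
        have hm2 : i < min ((r : Int) + p + 1) (grid.length : Int) := by simpa using hi2
        have hi0 : 0 ≤ i := le_trans (le_max_right _ _) hm1
        have hiR : i < (grid.length : Int) := lt_of_lt_of_le hm2 (min_le_right _ _)
        rw [pvH_get grid p i hi0 hiR] at hbody
        rw [Bool.and_eq_true, decide_eq_true_eq] at hbody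
        obtain ⟨hfil, hval⟩ := hbody
        rw [pvDilateRow_length'] at hfil
        have hcl : (c : Int) < ((grid.getD i.toNat []).length : Int) := by exact_mod_cast hfil
        rw [pvJ_iff _ p c (by omega) (by omega) hcl] at hval
        unfold pvCondB
        rw [Bool.and_eq_true, List.any_eq_true]
        refine ⟨by simp; omega, i.toNat, List.mem_range.2 (by omega), ?_⟩
        simp only [Bool.and_eq_true, decide_eq_true_eq]
        have h1 := le_max_left ((r : Int) - p) 0
        have h2 := min_le_left ((r : Int) + p + 1) (grid.length : Int)
        refine ⟨⟨by rw [abs_le]; omega, by exact_mod_cast hcl⟩, ?_⟩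
        exact hval
      · intro hB
        unfold pvCondB at hB
        rw [Bool.and_eq_true, List.any_eq_true] at hB
        obtain ⟨hp0, i, him, hbody⟩ := hB
        have hiR : i < grid.length := List.mem_range.1 him
        simp only [Bool.and_eq_true, decide_eq_true_eq] at hbody
        obtain ⟨⟨hdist, hclen⟩, hany⟩ := hbody
        have habs := abs_le.mp hdist
        refine ⟨(i : Int), ⟨by rw [max_le_iff]; constructor <;> omega, by rw [lt_min_iff]; constructor <;> omega⟩, ?_⟩
        rw [pvH_get grid p (i : Int) (by omega) (by exact_mod_cast hiR)]
        rw [Bool.and_eq_true, decide_eq_true_eq]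
        rw [Int.toNat_natCast]
        constructor
        · rw [pvDilateRow_length']; exact_mod_cast hclen
        · rw [pvJ_iff _ p c (by simp at hp0; omega) (by omega) (by exact_mod_cast hclen)]
          exact hany
    rw [hANY]
    by_cases hCB : pvCondB grid p r c = true <;> simp [hCB]

lemma pvCond_iff (grid : List (List Int)) (p : Int) (r c : Nat)
    (hr : r < grid.length) (hc : c < (grid.getD r []).length)
    (hne : (grid.getD r []).getD c 0 ≠ 2) :
    pvCondA grid p r c ↔ pvCondB grid p r c := by
  have hcell : ∀ (a b : Int), 0 ≤ a → 0 ≤ b →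
      pvCellA grid a b = (grid.getD a.toNat []).getD b.toNat 0 := by
    intro a b ha hb
    unfold pvCellA
    rw [PySem.List.pyGetD_of_nonneg _ _ ha, PySem.List.pyGetD_of_nonneg _ _ hb]
  have hrlen : ∀ a : Int, 0 ≤ a → pvRowLenA grid a = ((grid.getD a.toNat []).length : Int) := by
    intro a ha
    unfold pvRowLenA
    rw [PySem.List.pyGetD_of_nonneg _ _ ha]
  unfold pvCondA pvCondB
  simp only [List.any_eq_true, PySem.List.mem_pyRange_one, List.mem_range, Bool.and_eq_true,
    decide_eq_true_eq, beq_iff_eq, Bool.not_eq_true', beq_eq_false_iff_ne, ne_eq, and_assoc]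
  constructor
  · rintro ⟨i, hi0, hiR, j, hj0, hjL, hwall, di, hdi1, hdi2, dj, hdj1, hdj2, g1, g2, g3, g4, g5, hir, hjc, -, -⟩
    rw [hrlen i hi0] at hjL g4
    rw [hcell i j hi0 hj0] at hwall
    refine ⟨by omega, i.toNat, by omega, by rw [abs_le]; omega, by omega, j.toNat,
      by omega, ?_, by rw [abs_le]; omega⟩
    exact hwall
  · rintro ⟨hp0, i, hiR, hdist, hclen, j, hjL, hwall, hjdist⟩
    have habs1 := abs_le.mp hdist
    have habs2 := abs_le.mp hjdist
    refine ⟨(i : Int), by omega, by omega, (j : Int), by omega,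
      by rw [hrlen _ (by omega)]; simp only [Int.toNat_natCast]; omega,
      by rw [hcell _ _ (by omega) (by omega)]; simpa using hwall,
      ((r : Int) - i), by omega, by omega,
      ((c : Int) - j), by omega, by omega,
      by omega, by omega, by omega,
      by rw [hrlen _ (by omega)]; simp only [Int.toNat_natCast]; omega,
      ?_, by omega, by omega, hr, hc⟩
    rw [show (i : Int) + ((r : Int) - (i : Int)) = (r : Int) by ring,
        show (j : Int) + ((c : Int) - (j : Int)) = (c : Int) by ring]
    rw [hcell _ _ (by omega) (by omega)]
    simpa using hne

lemma pv_eq_of_get2 (g1 g2 : List (List Int))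
    (h1 : pvMapLen g1 = pvMapLen g2)
    (h : ∀ r c, pvGet2 g1 r c = pvGet2 g2 r c) : g1 = g2 := by
  have hlen := pvMapLen_length h1
  apply List.ext_getElem?
  intro r
  by_cases hr : r < g1.length
  · rw [List.getElem?_eq_getElem hr, List.getElem?_eq_getElem (show r < g2.length by omega)]
    congr 1
    apply List.ext_getElem?
    intro c
    have hgc := h r c
    unfold pvGet2 at hgc
    rw [List.getElem?_eq_getElem hr, List.getElem?_eq_getElem (show r < g2.length by omega)] at hgc
    simpa using hgc
  · rw [List.getElem?_eq_none_iff.2 (by omega), List.getElem?_eq_none_iff.2 (by omega)]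

lemma pvGet2_oob (g : List (List Int)) (r c : Nat)
    (h : ¬ (r < g.length ∧ c < (g.getD r []).length)) : pvGet2 g r c = none := by
  unfold pvGet2
  by_cases hr : r < g.length
  · rw [List.getElem?_eq_getElem hr]
    simp only [Option.bind_some]
    rw [List.getElem?_eq_none_iff.2 ?_]
    rw [← List.getD_eq_getElem _ ([] : List Int) hr]
    omega
  · rw [List.getElem?_eq_none_iff.2 (by omega)]
    rfl

lemma pvCondA_oob (grid : List (List Int)) (p : Int) (r c : Nat)
    (h : ¬ (r < grid.length ∧ c < (grid.getD r []).length)) :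
    pvCondA grid p r c = false := by
  rw [Bool.eq_false_iff]
  intro hT
  unfold pvCondA at hT
  simp only [List.any_eq_true, Bool.and_eq_true, decide_eq_true_eq, beq_iff_eq, and_assoc] at hT
  obtain ⟨i, -, j, -, -, di, -, dj, -, -, -, -, -, -, -, -, h1, h2⟩ := hT
  exact h ⟨h1, h2⟩

-- ===== VERDICT (by name: the statement is the Claim_ definition above) =====
theorem pad_walls_spec : Claim_equal_pad_walls := by
  intro grid p _hdom _hpre
  unfold Spec_pad_walls
  apply pv_eq_of_get2
  · exact (padA_char grid p 0 0).1.trans (padB_shape grid p).symm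
  · intro r c
    rw [(padA_char grid p r c).2]
    by_cases hr : r < grid.length
    · by_cases hc : c < (grid.getD r []).length
      · rw [padB_char grid p r c hr hc]
        have hgr : grid.getD r [] = grid[r]'hr := List.getD_eq_getElem _ _ hr
        have hc' : c < (grid[r]'hr).length := by rw [← hgr]; exact hc
        have hsome : pvGet2 grid r c = some ((grid.getD r []).getD c 0) := by
          unfold pvGet2
          rw [List.getElem?_eq_getElem hr]
          simp only [Option.bind_some]
          rw [List.getElem?_eq_getElem hc', hgr, List.getD_eq_getElem _ _ hc']
        by_cases hne : (grid.getD r []).getD c 0 = 2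
        · have h2v : pvGet2 grid r c = some 2 := by rw [hsome, hne]
          by_cases hA : pvCondA grid p r c = true <;>
            by_cases hB : pvCondB grid p r c = true <;>
            simp [hA, hB, h2v]
        · rw [if_congr (by exact_mod_cast pvCond_iff grid p r c hr hc hne) rfl rfl]
      · rw [pvCondA_oob grid p r c (by omega)]
        rw [pvGet2_oob grid r c (by omega)]
        have hB : pvGet2 (pad_walls_alt grid p) r c = none := by
          apply pvGet2_oob
          have h1 := pvMapLen_length (padB_shape grid p)
          have h2 := pvMapLen_row (padB_shape grid p) r
          omega
        rw [hB]
        simp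
    · rw [pvCondA_oob grid p r c (by omega)]
      rw [pvGet2_oob grid r c (by omega)]
      have hB : pvGet2 (pad_walls_alt grid p) r c = none := by
        apply pvGet2_oob
        have h1 := pvMapLen_length (padB_shape grid p)
        omega
      rw [hB]
      simp
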